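-- pv_equiv track=rewrite | github.com/tomasnyberg/cp_notebook | codeforces/710/B.py | replacefirstlast
-- ===== SOURCE A (Python) =====
-- def replacefirstlast(s):
--     result = 0
--     for i in range(len(s)):
--         if s[i] == '*':
--             s[i] = 'x'
--             result+=1
--             break
--     for i in range(len(s)-1,-1,-1):
--         if s[i] =='*':
--             s[i] = 'x'
--             result +=1
--             break
--     return (s, result)
-- ===== SOURCE B (Python) =====
-- def replacefirstlast(s):
--     # One forward pass records the first and last index holding '*';
--     # an apply phase then mutates s (same in-place mutation as A).
--     first = None
--     last = None
--     for i, c in enumerate(s):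
--         if c == '*':
--             if first is None:
--                 first = i
--             last = i
--     count = 0
--     if first is not None:
--         s[first] = 'x'
--         count = 1
--         if last != first:
--             s[last] = 'x'
--             count = 2
--     return (s, count)
-- ===== Notes on version B (the rewrite author's own statement) =====
-- stated objective: alternative
-- what changed: A makes two directional scan-with-break passes (forward, then backward); B makes one forward pass recording the first and last '*' indices and then applies the replacements in a separate phase.
import Mathlib
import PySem

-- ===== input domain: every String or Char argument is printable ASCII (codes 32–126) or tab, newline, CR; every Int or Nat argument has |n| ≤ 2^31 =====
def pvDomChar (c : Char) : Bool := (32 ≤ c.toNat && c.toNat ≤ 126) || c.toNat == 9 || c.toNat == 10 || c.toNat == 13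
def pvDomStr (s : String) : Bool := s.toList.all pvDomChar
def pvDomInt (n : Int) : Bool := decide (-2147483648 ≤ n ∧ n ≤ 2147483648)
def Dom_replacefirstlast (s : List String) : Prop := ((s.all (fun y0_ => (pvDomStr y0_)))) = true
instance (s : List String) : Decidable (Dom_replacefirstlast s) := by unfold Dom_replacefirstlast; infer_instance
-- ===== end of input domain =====

-- B replaces A's two directional scan-with-break loops by one forward pass collecting the
-- first/last '*' indices plus an apply phase (objective: alternative decomposition, same cost).
-- Both Pythons mutate the argument list in place; B performs the same mutation, and the
-- equivalence proved here is about the returned value.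

-- ===== PORT A =====
-- first loop of A: scan forward, replace the first '*' with 'x' and stop (break)
def pvAFwd : List String → List String × Int
  | [] => ([], 0)
  | x :: xs =>
    if x = "*" then ("x" :: xs, 1)
    else
      let r := pvAFwd xs
      (x :: r.1, r.2)

-- second loop of A: scan from the back (the suffix is examined first), replace the
-- first '*' met from the right and stop (break)
def pvABwd : List String → List String × Int
  | [] => ([], 0)
  | x :: xs =>
    let r := pvABwd xs
    if r.2 = 1 then (x :: r.1, 1)
    else if x = "*" then ("x" :: xs, 1)
    else (x :: xs, 0)

def replacefirstlast (s : List String) : List String × Int :=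
  let r1 := pvAFwd s
  let r2 := pvABwd r1.1
  (r2.1, r1.2 + r2.2)

-- ===== PORT B =====
def replacefirstlast_alt (s : List String) : List String × Int :=
  let fl := (PySem.List.enumerate s 0).foldl
    (fun (fl : Option Int × Option Int) p =>
      if p.2 = "*" then ((if fl.1.isNone then some p.1 else fl.1), some p.1) else fl)
    (none, none)
  match fl.1, fl.2 with
  | some f, some l =>
      let s1 := PySem.List.pySetD s f "x"
      if l ≠ f then (PySem.List.pySetD s1 l "x", 2) else (s1, 1)
  | _, _ => (s, 0)

-- ===== PRECONDITION & SPEC =====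
def Spec_replacefirstlast (s : List String) (out : List String × Int) : Prop := out = replacefirstlast_alt s
instance (s : List String) (out : List String × Int) : Decidable (Spec_replacefirstlast s out) := by unfold Spec_replacefirstlast; infer_instance

-- ===== CLAIM (what is proved, stated in full; the proofs are below) =====
def Claim_equal_replacefirstlast : Prop := ∀ (s : List String), Dom_replacefirstlast s → Spec_replacefirstlast s (replacefirstlast s)

-- ===== LEMMAS AND PROOFS =====

-- index of the first '*' (proof-side)
def pvFN : List String → Option Nat
  | [] => none
  | x :: xs => if x = "*" then some 0 else (pvFN xs).map (· + 1)

-- index of the last '*' (proof-side)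
def pvLN : List String → Option Nat
  | [] => none
  | x :: xs =>
    match pvLN xs with
    | some n => some (n + 1)
    | none => if x = "*" then some 0 else none

-- Int-offset versions matching the enumerate fold
def pvFI : List String → Int → Option Int
  | [], _ => none
  | x :: xs, k => if x = "*" then some k else pvFI xs (k + 1)

def pvLI : List String → Int → Option Int
  | [], _ => none
  | x :: xs, k => (pvLI xs (k + 1)).or (if x = "*" then some k else none)

theorem pvFN_none_iff_pvLN_none (s : List String) : pvFN s = none ↔ pvLN s = none := by
  induction s with
  | nil => simp [pvFN, pvLN]
  | cons x xs ih =>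
    by_cases hx : x = "*" <;> cases h : pvLN xs <;>
      simp_all [pvFN, pvLN, Option.map_eq_none_iff]

theorem pvAFwd_char (s : List String) :
    pvAFwd s = ((match pvFN s with
                 | some n => s.set n "x"
                 | none => s),
                (match pvFN s with | some _ => (1 : Int) | none => 0)) := by
  induction s with
  | nil => simp [pvAFwd, pvFN]
  | cons x xs ih =>
    by_cases hx : x = "*"
    · simp [pvAFwd, pvFN, hx]
    · cases h : pvFN xs <;> simp_all [pvAFwd, pvFN]

theorem pvABwd_char (s : List String) :
    pvABwd s = ((match pvLN s with
                 | some n => s.set n "x"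
                 | none => s),
                (match pvLN s with | some _ => (1 : Int) | none => 0)) := by
  induction s with
  | nil => simp [pvABwd, pvLN]
  | cons x xs ih =>
    cases h : pvLN xs with
    | some n => simp_all [pvABwd, pvLN]
    | none =>
      by_cases hx : x = "*" <;> simp_all [pvABwd, pvLN]

-- replacing the first '*' with 'x': the last-'*' index becomes none if it was the
-- same position, and is unchanged otherwise
theorem pvLN_set (s : List String) (fn : Nat) (h : pvFN s = some fn) :
    pvLN (s.set fn "x") = if pvLN s = some fn then none else pvLN s := by
  induction s generalizing fn with
  | nil => simp [pvFN] at h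
  | cons x xs ih =>
    by_cases hx : x = "*"
    · simp [pvFN, hx] at h
      subst h
      cases hl : pvLN xs with
      | some n => simp [pvLN, hl, List.set]
      | none => simp [pvLN, hl, hx, List.set]
    · simp [pvFN, hx, Option.map_eq_some_iff] at h
      obtain ⟨g, hg, rfl⟩ := h
      have hlx : pvLN xs ≠ none := by
        intro hn
        rw [← pvFN_none_iff_pvLN_none] at hn
        simp [hg] at hn
      cases hl : pvLN xs with
      | none => exact absurd hl hlx
      | some m =>
        have := ih g hg
        rw [hl] at this
        by_cases hmg : m = g
        · subst hmg
          simp at this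
          simp [List.set, pvLN, this, hl, hx]
        · simp [hmg] at this
          simp [List.set, pvLN, this, hl, hmg]

-- the fold over enumerate computes (first-or-kept, last-or-kept)
theorem pvFold_char (s : List String) (k : Int) (f0 l0 : Option Int) :
    (PySem.List.enumerate s k).foldl
      (fun (fl : Option Int × Option Int) p =>
        if p.2 = "*" then ((if fl.1.isNone then some p.1 else fl.1), some p.1) else fl)
      (f0, l0)
    = (f0.or (pvFI s k), (pvLI s k).or l0) := by
  induction s generalizing k f0 l0 with
  | nil => simp [PySem.List.enumerate_nil, pvFI, pvLI]
  | cons x xs ih =>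
    rw [PySem.List.enumerate_cons]
    by_cases hx : x = "*"
    · simp only [List.foldl_cons, hx]
      rw [ih]
      cases f0 <;> simp [pvFI, pvLI]
    · simp only [List.foldl_cons]
      rw [if_neg (by simp [hx])]
      rw [ih]
      simp [pvFI, pvLI, hx]

-- offset relation between the Int- and Nat-indexed first/last functions
theorem pvFI_eq (s : List String) (k : Int) :
    pvFI s k = (pvFN s).map (fun n => k + (n : Int)) := by
  induction s generalizing k with
  | nil => simp [pvFI, pvFN]
  | cons x xs ih =>
    by_cases hx : x = "*"
    · simp [pvFI, pvFN, hx]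
    · rw [pvFI, pvFN, if_neg hx, if_neg hx, ih]
      cases pvFN xs
      · simp
      · simp; omega

theorem pvLI_eq (s : List String) (k : Int) :
    pvLI s k = (pvLN s).map (fun n => k + (n : Int)) := by
  induction s generalizing k with
  | nil => simp [pvLI, pvLN]
  | cons x xs ih =>
    rw [pvLI, ih]
    cases h : pvLN xs with
    | some n => simp [pvLN, h]; omega
    | none =>
      by_cases hx : x = "*" <;> simp [pvLN, h, hx]

theorem replacefirstlast_alt_char (s : List String) :
    replacefirstlast_alt s
    = (match pvFN s, pvLN s with
       | some fn, some ln =>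
         if ln ≠ fn then ((s.set fn "x").set ln "x", (2 : Int)) else (s.set fn "x", 1)
       | _, _ => (s, 0)) := by
  unfold replacefirstlast_alt
  rw [pvFold_char, pvFI_eq, pvLI_eq]
  cases hf : pvFN s with
  | none =>
    have hl : pvLN s = none := (pvFN_none_iff_pvLN_none s).mp hf
    simp [hl]
  | some fn =>
    cases hl : pvLN s with
    | none =>
      have h0 : pvFN s = none := (pvFN_none_iff_pvLN_none s).mpr hl
      rw [h0] at hf; exact absurd hf (by simp)
    | some ln =>
      simp only [Option.or_none, Option.none_or, zero_add]
      by_cases h : ln = fn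
      · subst h
        simp [PySem.List.pySetD_natCast]
      · have : (ln : Int) ≠ (fn : Int) := by exact_mod_cast h
        simp [this, h, PySem.List.pySetD_natCast]

-- ===== VERDICT (by name: the statement is the Claim_ definition above) =====
theorem replacefirstlast_spec : Claim_equal_replacefirstlast := by
  intro s _
  show replacefirstlast s = replacefirstlast_alt s
  rw [replacefirstlast_alt_char]
  unfold replacefirstlast
  rw [pvAFwd_char]
  cases hf : pvFN s with
  | none =>
    have hl : pvLN s = none := (pvFN_none_iff_pvLN_none s).mp hf
    show ((pvABwd s).1, 0 + (pvABwd s).2) = _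
    rw [pvABwd_char, hl]
    simp
  | some fn =>
    cases hl : pvLN s with
    | none =>
      have h0 : pvFN s = none := (pvFN_none_iff_pvLN_none s).mpr hl
      rw [h0] at hf; exact absurd hf (by simp)
    | some ln =>
      show ((pvABwd (s.set fn "x")).1, 1 + (pvABwd (s.set fn "x")).2)
        = if ln ≠ fn then ((s.set fn "x").set ln "x", (2 : Int)) else (s.set fn "x", 1)
      rw [pvABwd_char, pvLN_set s fn hf, hl]
      by_cases h : ln = fn
      · subst h; simp
      · simp [h]
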